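-- pv_equiv track=rewrite | github.com/Aiden16/DSA | ARRAY/union-of-two-arrays.py | doUnion
-- ===== SOURCE A (Python) =====
-- def doUnion(a,n,b,m):
--     h={}
--     for i in a:
--         if i in h:
--             continue
--         h[i]=1
--     for i in b:
--         if i in h:
--             continue
--         h[i] = 1
--     return len(h)
-- ===== SOURCE B (Python) =====
-- def doUnion(a, n, b, m):
--     s = sorted(a + b)
--     count = 0
--     prev = None
--     for x in s:
--         if prev is None or x != prev:
--             count += 1
--         prev = x
--     return count
-- ===== Notes on version B (the rewrite author's own statement) =====
-- stated objective: alternative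
-- what changed: Replaces the hash-table (dict) membership/insert accumulation with sort-then-scan: concatenate, sort, and count positions that differ from their predecessor in one linear pass.
import Mathlib
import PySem

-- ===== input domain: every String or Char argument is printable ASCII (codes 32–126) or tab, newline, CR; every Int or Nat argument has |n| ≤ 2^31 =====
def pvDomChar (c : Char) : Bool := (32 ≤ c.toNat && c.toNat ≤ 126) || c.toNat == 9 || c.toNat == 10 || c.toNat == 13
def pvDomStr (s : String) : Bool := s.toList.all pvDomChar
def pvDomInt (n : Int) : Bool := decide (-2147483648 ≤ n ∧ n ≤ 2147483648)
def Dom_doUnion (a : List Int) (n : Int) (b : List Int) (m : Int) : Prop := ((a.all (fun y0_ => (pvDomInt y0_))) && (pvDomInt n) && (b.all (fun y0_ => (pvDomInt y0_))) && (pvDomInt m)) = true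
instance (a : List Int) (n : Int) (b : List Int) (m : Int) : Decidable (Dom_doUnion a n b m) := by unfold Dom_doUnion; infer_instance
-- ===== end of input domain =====

-- B replaces A's dict-based distinct accumulation with sort-then-scan (count entries differing from their predecessor); alternative algorithm, same results.


-- ===== PORT A =====
-- 'if i in h: continue; h[i] = 1' on a dict, run over a then over b; return len(h)
def doUnionStep (h : PySem.Dict Int Int) (i : Int) : PySem.Dict Int Int :=
  if h.contains i then h else h.insert i 1

def doUnion (a : List Int) (_n : Int) (b : List Int) (_m : Int) : Int :=
  let h := a.foldl doUnionStep PySem.Dict.empty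
  let h := b.foldl doUnionStep h
  (h.size : Int)

-- ===== PORT B =====
-- one pass over the sorted concatenation, counting entries that differ from the previous one
def scanDistinct : List Int → Option Int → Int → Int
  | [], _, c => c
  | x :: t, prev, c => scanDistinct t (some x) (if prev = some x then c else c + 1)

def doUnion_alt (a : List Int) (_n : Int) (b : List Int) (_m : Int) : Int :=
  scanDistinct (PySem.List.sorted (a ++ b) (fun x => x) false) none 0

-- ===== PRECONDITION & SPEC =====
def Spec_doUnion (a : List Int) (n : Int) (b : List Int) (m : Int) (out : Int) : Prop := out = doUnion_alt a n b m
instance (a : List Int) (n : Int) (b : List Int) (m : Int) (out : Int) : Decidable (Spec_doUnion a n b m out) := by unfold Spec_doUnion; infer_instance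

-- ===== CLAIM (what is proved, stated in full; the proofs are below) =====
def Claim_equal_doUnion : Prop := ∀ (a : List Int) (n : Int) (b : List Int) (m : Int), Dom_doUnion a n b m → Spec_doUnion a n b m (doUnion a n b m)

-- ===== LEMMAS AND PROOFS =====

lemma card_insert_eq_card_erase_add_one (s : Finset Int) (x : Int) :
    (insert x s).card = (s.erase x).card + 1 := by
  have h1 : insert x s = insert x (s.erase x) := by
    ext y; by_cases hy : y = x <;> simp [hy]
  rw [h1, Finset.card_insert_of_notMem (Finset.notMem_erase x s)]

-- A-side: the dict fold accumulates exactly the distinct keys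
lemma foldA (l : List Int) (d : PySem.Dict Int Int) (hd : d.keys.Nodup) :
    (l.foldl doUnionStep d).keys.Nodup ∧
      (l.foldl doUnionStep d).keys.toFinset = d.keys.toFinset ∪ l.toFinset := by
  induction l generalizing d with
  | nil => simpa using hd
  | cons x t ih =>
    simp only [List.foldl_cons, doUnionStep]
    by_cases hc : d.contains x = true
    · have hx : x ∈ d.keys := (PySem.Dict.contains_iff_mem_keys d x).mp hc
      simp only [hc, if_true]
      obtain ⟨h1, h2⟩ := ih d hd
      refine ⟨h1, ?_⟩
      rw [h2]
      ext y
      by_cases hy : y = x <;> simp [hy, List.mem_toFinset.mpr hx]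
    · have hc' : d.contains x = false := by revert hc; cases d.contains x <;> simp
      have hx : x ∉ d.keys := by
        intro h
        have h2 := (PySem.Dict.contains_iff_mem_keys d x).mpr h
        rw [hc'] at h2
        exact Bool.false_ne_true h2
      simp only [hc', if_neg, Bool.false_eq_true, not_false_eq_true]
      have hkeys : (d.insert x 1).keys = d.keys ++ [x] :=
        PySem.Dict.keys_insert_of_not_contains d 1 hc'
      have hnd' : (d.insert x 1).keys.Nodup := by
        rw [hkeys, List.nodup_append]
        refine ⟨hd, List.nodup_singleton x, ?_⟩
        intro y hy z hz heq
        apply hx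
        rw [heq, List.mem_singleton.mp hz] at hy
        exact hy
      obtain ⟨h1, h2⟩ := ih _ hnd'
      refine ⟨h1, ?_⟩
      rw [h2, hkeys]
      ext y
      by_cases hy : y = x <;> simp [hy, or_comm]

-- size of a nodup-keys dict is the card of its key set
lemma foldA_size (l : List Int) :
    ((l.foldl doUnionStep PySem.Dict.empty).size : Int) = (l.toFinset.card : Int) := by
  obtain ⟨h1, h2⟩ := foldA l PySem.Dict.empty (by simp)
  have hsz : (l.foldl doUnionStep PySem.Dict.empty).size
      = (l.foldl doUnionStep PySem.Dict.empty).keys.length := by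
    simp [PySem.Dict.size, PySem.Dict.keys]
  rw [hsz, ← List.toFinset_card_of_nodup h1, h2]
  simp [PySem.Dict.keys_empty]

-- B-side: the scan over a sorted list counts the distinct elements
lemma scan_some (s : List Int) (hs : s.Pairwise (· ≤ ·)) :
    ∀ (p c : Int), (∀ x ∈ s, p ≤ x) →
      scanDistinct s (some p) c = c + ((s.toFinset.erase p).card : Int) := by
  induction s with
  | nil => intro p c _; simp [scanDistinct]
  | cons x t ih =>
    intro p c hp
    have hx : ∀ y ∈ t, x ≤ y := (List.pairwise_cons.mp hs).1
    have ht : t.Pairwise (· ≤ ·) := (List.pairwise_cons.mp hs).2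
    have hpx : p ≤ x := hp x (by simp)
    simp only [scanDistinct]
    rw [ih ht x _ hx]
    by_cases hpe : p = x
    · subst hpe
      simp [Finset.erase_insert_eq_erase]
    · have hne : (some p : Option Int) ≠ some x := by simpa using hpe
      simp only [hne, ite_false]
      have hplt : p < x := lt_of_le_of_ne hpx hpe
      have hpni : p ∉ insert x t.toFinset := by
        intro h
        rcases Finset.mem_insert.mp h with h | h
        · exact absurd h hpe
        · exact absurd (hx p (List.mem_toFinset.mp h)) (not_le.mpr hplt)
      rw [List.toFinset_cons, Finset.erase_eq_of_notMem hpni,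
        card_insert_eq_card_erase_add_one]
      push_cast; ring

lemma scan_none (s : List Int) (hs : s.Pairwise (· ≤ ·)) :
    scanDistinct s none 0 = (s.toFinset.card : Int) := by
  cases s with
  | nil => simp [scanDistinct]
  | cons x t =>
    have hx : ∀ y ∈ t, x ≤ y := (List.pairwise_cons.mp hs).1
    have ht : t.Pairwise (· ≤ ·) := (List.pairwise_cons.mp hs).2
    simp only [scanDistinct, reduceCtorEq, ite_false]
    rw [scan_some t ht x _ hx, List.toFinset_cons,
      card_insert_eq_card_erase_add_one]
    push_cast; ring

-- ===== VERDICT (by name: the statement is the Claim_ definition above) =====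
theorem doUnion_spec : Claim_equal_doUnion := by
  intro a n b m _
  unfold Spec_doUnion doUnion doUnion_alt
  show ((b.foldl doUnionStep (a.foldl doUnionStep PySem.Dict.empty)).size : Int)
      = scanDistinct (PySem.List.sorted (a ++ b) (fun x => x) false) none 0
  rw [← List.foldl_append, foldA_size]
  have hperm := PySem.List.sorted_perm (a ++ b) (fun x => x) false
  have hpw := PySem.List.sorted_pairwise (xs := a ++ b) (key := fun x => x)
  have htf : (PySem.List.sorted (a ++ b) (fun x => x) false).toFinset = (a ++ b).toFinset := by
    ext y; simp [List.mem_toFinset, hperm.mem_iff]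
  rw [scan_none _ hpw, htf]
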